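-- pv_equiv track=rewrite | github.com/FOX2920/OKR-Shift-and-checkin-analysis | app.py | _calculate_email_stats
-- ===== SOURCE A (Python) =====
-- from typing import Dict, List, Tuple, Optional, Any
--
-- def _calculate_email_stats(total_members: int, members_without_goals: List,
--                           members_without_checkins: List, okr_shifts: List,
--                           okr_shifts_monthly: Optional[List] = None) -> Dict:
--     """Calculate statistics for email report"""
--     members_with_goals = total_members - len(members_without_goals)
--     members_with_checkins = total_members - len(members_without_checkins)
--
--     stats = {
--         'total_members': total_members,
--         'members_with_goals': members_with_goals,
--         'members_with_checkins': members_with_checkins,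
--         'progress_users': len([u for u in okr_shifts if u['okr_shift'] > 0]) if okr_shifts else 0,
--         'stable_users': len([u for u in okr_shifts if u['okr_shift'] == 0]) if okr_shifts else 0,
--         'issue_users': len([u for u in okr_shifts if u['okr_shift'] < 0]) if okr_shifts else 0
--     }
--
--     if okr_shifts_monthly:
--         stats.update({
--             'progress_users_monthly': len([u for u in okr_shifts_monthly if u['okr_shift_monthly'] > 0]),
--             'stable_users_monthly': len([u for u in okr_shifts_monthly if u['okr_shift_monthly'] == 0]),
--             'issue_users_monthly': len([u for u in okr_shifts_monthly if u['okr_shift_monthly'] < 0])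
--         })
--
--     return stats
-- ===== SOURCE B (Python) =====
-- def _calculate_email_stats(total_members, members_without_goals,
--                            members_without_checkins, okr_shifts,
--                            okr_shifts_monthly=None):
--     """Single fused pass per shift list instead of three filter comprehensions."""
--     def count_signs(users, key):
--         prog = stab = issue = 0
--         for u in users:
--             v = u[key]
--             if v > 0:
--                 prog += 1
--             elif v == 0:
--                 stab += 1
--             else:
--                 issue += 1
--         return prog, stab, issue
--
--     prog, stab, issue = count_signs(okr_shifts, 'okr_shift') if okr_shifts else (0, 0, 0)
--     stats = {
--         'total_members': total_members,
--         'members_with_goals': total_members - len(members_without_goals),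
--         'members_with_checkins': total_members - len(members_without_checkins),
--         'progress_users': prog,
--         'stable_users': stab,
--         'issue_users': issue,
--     }
--     if okr_shifts_monthly:
--         pm, sm, im = count_signs(okr_shifts_monthly, 'okr_shift_monthly')
--         stats['progress_users_monthly'] = pm
--         stats['stable_users_monthly'] = sm
--         stats['issue_users_monthly'] = im
--     return stats
-- ===== Notes on version B (the rewrite author's own statement) =====
-- stated objective: simpler
-- what changed: Replaces the three separate filtering comprehensions over each shift list (three passes per list) with one fused loop that classifies each element by the sign of its shift into three counters.
import Mathlib
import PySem

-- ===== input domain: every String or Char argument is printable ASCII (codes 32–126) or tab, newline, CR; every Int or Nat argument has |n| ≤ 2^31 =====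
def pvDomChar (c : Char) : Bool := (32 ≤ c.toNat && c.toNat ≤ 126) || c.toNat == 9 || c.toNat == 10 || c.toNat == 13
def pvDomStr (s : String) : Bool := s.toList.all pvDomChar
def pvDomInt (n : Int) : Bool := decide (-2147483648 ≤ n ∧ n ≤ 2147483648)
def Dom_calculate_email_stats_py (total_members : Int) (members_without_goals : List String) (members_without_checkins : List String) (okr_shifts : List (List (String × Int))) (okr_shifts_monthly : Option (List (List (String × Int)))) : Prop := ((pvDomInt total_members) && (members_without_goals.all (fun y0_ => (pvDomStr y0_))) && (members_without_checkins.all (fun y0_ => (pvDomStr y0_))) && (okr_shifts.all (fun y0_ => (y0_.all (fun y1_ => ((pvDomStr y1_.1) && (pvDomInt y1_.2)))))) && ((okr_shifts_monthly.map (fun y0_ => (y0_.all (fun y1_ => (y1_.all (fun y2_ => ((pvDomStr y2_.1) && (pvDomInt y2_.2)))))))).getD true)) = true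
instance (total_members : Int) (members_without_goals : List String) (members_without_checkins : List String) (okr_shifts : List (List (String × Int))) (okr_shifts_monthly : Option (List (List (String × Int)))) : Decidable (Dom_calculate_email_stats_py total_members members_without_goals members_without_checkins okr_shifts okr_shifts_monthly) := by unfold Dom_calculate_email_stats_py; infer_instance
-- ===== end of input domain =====

-- B fuses A's three per-list filter comprehensions into one sign-classifying loop; equivalence is about the returned dict (as an assoc list).

-- ===== PORT A =====
-- u[k] on a Python dict (assoc list, first match); total form, used only under Pre_ (key present)
def pvLookupA (u : List (String × Int)) (k : String) : Int :=
  (((u.find? (fun p => p.1 == k)).map Prod.snd).getD 0)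

def calculate_email_stats_py (total_members : Int) (members_without_goals : List String) (members_without_checkins : List String) (okr_shifts : List (List (String × Int))) (okr_shifts_monthly : Option (List (List (String × Int)))) : List (String × Int) :=
  let members_with_goals := total_members - (members_without_goals.length : Int)
  let members_with_checkins := total_members - (members_without_checkins.length : Int)
  let stats : PySem.Dict String Int := PySem.Dict.ofList
    [ ("total_members", total_members),
      ("members_with_goals", members_with_goals),
      ("members_with_checkins", members_with_checkins),
      ("progress_users", if !okr_shifts.isEmpty then ((okr_shifts.filter (fun u => decide (0 < pvLookupA u "okr_shift"))).length : Int) else 0),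
      ("stable_users",   if !okr_shifts.isEmpty then ((okr_shifts.filter (fun u => decide (pvLookupA u "okr_shift" = 0))).length : Int) else 0),
      ("issue_users",    if !okr_shifts.isEmpty then ((okr_shifts.filter (fun u => decide (pvLookupA u "okr_shift" < 0))).length : Int) else 0) ]
  let stats :=
    match okr_shifts_monthly with
    | some l =>
        if !l.isEmpty then
          ((stats.insert "progress_users_monthly" ((l.filter (fun u => decide (0 < pvLookupA u "okr_shift_monthly"))).length : Int)).insert
            "stable_users_monthly" ((l.filter (fun u => decide (pvLookupA u "okr_shift_monthly" = 0))).length : Int)).insert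
            "issue_users_monthly" ((l.filter (fun u => decide (pvLookupA u "okr_shift_monthly" < 0))).length : Int)
        else stats
    | none => stats
  stats.items

-- ===== PORT B =====
-- first-match lookup, recursive form
def pvLookupB (u : List (String × Int)) (k : String) : Int :=
  match u with
  | [] => 0
  | (k', v) :: rest => if k' == k then v else pvLookupB rest k

-- one fused pass: classify each user's shift sign into (progress, stable, issue)
def pvCountSigns (key : String) (users : List (List (String × Int))) : Int × Int × Int :=
  users.foldl
    (fun acc u =>
      let v := pvLookupB u key
      if 0 < v then (acc.1 + 1, acc.2.1, acc.2.2)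
      else if v = 0 then (acc.1, acc.2.1 + 1, acc.2.2)
      else (acc.1, acc.2.1, acc.2.2 + 1))
    (0, 0, 0)

def calculate_email_stats_py_alt (total_members : Int) (members_without_goals : List String) (members_without_checkins : List String) (okr_shifts : List (List (String × Int))) (okr_shifts_monthly : Option (List (List (String × Int)))) : List (String × Int) :=
  let c := if !okr_shifts.isEmpty then pvCountSigns "okr_shift" okr_shifts else (0, 0, 0)
  let base : List (String × Int) :=
    [ ("total_members", total_members),
      ("members_with_goals", total_members - (members_without_goals.length : Int)),
      ("members_with_checkins", total_members - (members_without_checkins.length : Int)),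
      ("progress_users", c.1), ("stable_users", c.2.1), ("issue_users", c.2.2) ]
  match okr_shifts_monthly with
  | some l =>
      if !l.isEmpty then
        let m := pvCountSigns "okr_shift_monthly" l
        base ++ [("progress_users_monthly", m.1), ("stable_users_monthly", m.2.1), ("issue_users_monthly", m.2.2)]
      else base
  | none => base

-- ===== PRECONDITION & SPEC =====
-- Pre_ excludes exactly the inputs where A raises KeyError: a looked-up dict missing its shift key.
def Pre_calculate_email_stats_py (total_members : Int) (members_without_goals : List String) (members_without_checkins : List String) (okr_shifts : List (List (String × Int))) (okr_shifts_monthly : Option (List (List (String × Int)))) : Prop :=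
  (∀ u ∈ okr_shifts, "okr_shift" ∈ u.map Prod.fst) ∧
  (∀ l, okr_shifts_monthly = some l → ∀ u ∈ l, "okr_shift_monthly" ∈ u.map Prod.fst)
instance (total_members : Int) (members_without_goals : List String) (members_without_checkins : List String) (okr_shifts : List (List (String × Int))) (okr_shifts_monthly : Option (List (List (String × Int)))) : Decidable (Pre_calculate_email_stats_py total_members members_without_goals members_without_checkins okr_shifts okr_shifts_monthly) := by unfold Pre_calculate_email_stats_py; infer_instance

def pvWitness_calculate_email_stats_py : Int × List String × List String × (List (List (String × Int))) × (Option (List (List (String × Int)))) :=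
  (3, ["a"], [], [[("okr_shift", 1)], [("okr_shift", 0)], [("okr_shift", -2)]], some [[("okr_shift_monthly", 5)]])

def Spec_calculate_email_stats_py (total_members : Int) (members_without_goals : List String) (members_without_checkins : List String) (okr_shifts : List (List (String × Int))) (okr_shifts_monthly : Option (List (List (String × Int)))) (out : List (String × Int)) : Prop := out = calculate_email_stats_py_alt total_members members_without_goals members_without_checkins okr_shifts okr_shifts_monthly
instance (total_members : Int) (members_without_goals : List String) (members_without_checkins : List String) (okr_shifts : List (List (String × Int))) (okr_shifts_monthly : Option (List (List (String × Int)))) (out : List (String × Int)) : Decidable (Spec_calculate_email_stats_py total_members members_without_goals members_without_checkins okr_shifts okr_shifts_monthly out) := by unfold Spec_calculate_email_stats_py; infer_instance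

-- ===== CLAIM (what is proved, stated in full; the proofs are below) =====
def Claim_equal_calculate_email_stats_py : Prop := ∀ (total_members : Int) (members_without_goals : List String) (members_without_checkins : List String) (okr_shifts : List (List (String × Int))) (okr_shifts_monthly : Option (List (List (String × Int)))), Dom_calculate_email_stats_py total_members members_without_goals members_without_checkins okr_shifts okr_shifts_monthly → Pre_calculate_email_stats_py total_members members_without_goals members_without_checkins okr_shifts okr_shifts_monthly → Spec_calculate_email_stats_py total_members members_without_goals members_without_checkins okr_shifts okr_shifts_monthly (calculate_email_stats_py total_members members_without_goals members_without_checkins okr_shifts okr_shifts_monthly)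

-- ===== LEMMAS AND PROOFS =====

theorem pvLookup_eq (u : List (String × Int)) (k : String) : pvLookupA u k = pvLookupB u k := by
  induction u with
  | nil => rfl
  | cons p rest ih =>
      obtain ⟨k', v⟩ := p
      by_cases h : k' = k
      · simp [pvLookupA, pvLookupB, List.find?, h]
      · have hb : (k' == k) = false := beq_eq_false_iff_ne.mpr h
        simp only [pvLookupA, pvLookupB, List.find?] at *
        simp [hb, ih]

theorem pvCountSigns_aux (key : String) (users : List (List (String × Int))) :
    ∀ p s i : Int,
      users.foldl
        (fun acc u =>
          let v := pvLookupB u key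
          if 0 < v then (acc.1 + 1, acc.2.1, acc.2.2)
          else if v = 0 then (acc.1, acc.2.1 + 1, acc.2.2)
          else (acc.1, acc.2.1, acc.2.2 + 1))
        (p, s, i)
      = (p + ((users.filter (fun u => decide (0 < pvLookupA u key))).length : Int),
         s + ((users.filter (fun u => decide (pvLookupA u key = 0))).length : Int),
         i + ((users.filter (fun u => decide (pvLookupA u key < 0))).length : Int)) := by
  induction users with
  | nil => simp
  | cons u rest ih =>
      intro p s i
      simp only [List.foldl_cons, List.filter_cons]
      rw [pvLookup_eq] at *
      by_cases h1 : 0 < pvLookupB u key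
      · simp [h1, not_lt.mpr (le_of_lt h1), ne_of_gt h1, ih]
        all_goals omega
      · by_cases h2 : pvLookupB u key = 0
        · simp [h1, h2, ih]
          all_goals omega
        · have h3 : pvLookupB u key < 0 := by omega
          simp [h1, h2, h3, ih]
          all_goals omega

theorem pvCountSigns_eq (key : String) (users : List (List (String × Int))) :
    pvCountSigns key users
      = (((users.filter (fun u => decide (0 < pvLookupA u key))).length : Int),
         ((users.filter (fun u => decide (pvLookupA u key = 0))).length : Int),
         ((users.filter (fun u => decide (pvLookupA u key < 0))).length : Int)) := by
  have := pvCountSigns_aux key users 0 0 0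
  simpa [pvCountSigns] using this

-- ===== VERDICT (by name: the statement is the Claim_ definition above) =====
theorem calculate_email_stats_py_spec : Claim_equal_calculate_email_stats_py := by
  intro tm mg mc os osm _ _
  unfold Spec_calculate_email_stats_py calculate_email_stats_py calculate_email_stats_py_alt
  cases osm with
  | none =>
      cases os <;>
        simp [PySem.Dict.ofList, PySem.Dict.update, PySem.Dict.insert, PySem.Dict.empty,
              PySem.Dict.contains, List.foldl, pvCountSigns_eq]
  | some l =>
      by_cases hl : l.isEmpty <;> cases os <;>
        simp [hl, PySem.Dict.ofList, PySem.Dict.update, PySem.Dict.insert, PySem.Dict.empty,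
              PySem.Dict.contains, List.foldl, pvCountSigns_eq]
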